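-- pv_equiv track=rewrite | github.com/abeutot/advent_of_code_2020 | year_2018/day_02/test_main.py | count
-- ===== SOURCE A (Python) =====
-- from collections import Counter
--
-- def count(str_):
--     c = Counter(str_)
--     has_two = has_three = False
--     for k, v in c.items():
--         if v == 2:
--             has_two = True
--         elif v == 3:
--             has_three = True
--
--     return (has_two, has_three)
-- ===== SOURCE B (Python) =====
-- def count(str_):
--     def scan(s):
--         # s is sorted; consume one run of equal characters, recurse on the rest
--         if not s:
--             return (False, False)
--         ch = s[0]
--         run = 1
--         while run < len(s) and s[run] == ch:
--             run += 1
--         two, three = scan(s[run:])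
--         return (two or run == 2, three or run == 3)
--     return scan(sorted(str_))
-- ===== Notes on version B (the rewrite author's own statement) =====
-- stated objective: alternative
-- what changed: Replaces the Counter hash tally and flag loop with sort-then-scan: sort the characters and recursively consume maximal runs of equal characters, setting the flags from each run length.
import Mathlib
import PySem

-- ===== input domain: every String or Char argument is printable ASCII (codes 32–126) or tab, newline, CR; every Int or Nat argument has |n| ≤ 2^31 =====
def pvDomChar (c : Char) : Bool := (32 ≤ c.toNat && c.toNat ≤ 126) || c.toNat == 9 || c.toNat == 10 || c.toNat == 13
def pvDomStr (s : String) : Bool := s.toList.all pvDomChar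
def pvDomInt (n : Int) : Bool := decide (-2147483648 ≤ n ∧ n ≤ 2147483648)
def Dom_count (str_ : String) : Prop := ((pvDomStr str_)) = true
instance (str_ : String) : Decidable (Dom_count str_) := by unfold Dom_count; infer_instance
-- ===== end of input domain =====

-- B replaces the Counter hash tally with sort-then-scan over runs of equal characters (alternative algorithm, similar cost).

-- ===== PORT A =====
-- c = Counter(str_); for k, v in c.items(): if v == 2: has_two = True elif v == 3: has_three = True
def count (str_ : String) : Bool × Bool :=
  let c := PySem.Dict.counter str_.toList
  c.items.foldl
    (fun (st : Bool × Bool) (kv : Char × Int) =>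
      if kv.2 == 2 then (true, st.2)
      else if kv.2 == 3 then (st.1, true)
      else st)
    (false, false)

-- ===== PORT B =====
-- the 'while run < len(s) and s[run] == ch: run += 1' advance: length of the leading run of ch in the tail
def pvRun (ch : Char) : List Char → Nat
  | [] => 0
  | c :: t => if c == ch then pvRun ch t + 1 else 0

theorem pvRun_le_length (ch : Char) (t : List Char) : pvRun ch t ≤ t.length := by
  induction t with
  | nil => simp [pvRun]
  | cons c t ih => simp only [pvRun, List.length_cons]; split <;> omega

-- scan(s): consume one maximal run, recurse on s[run:]
def pvScan : List Char → Bool × Bool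
  | [] => (false, false)
  | ch :: t =>
    let run := 1 + pvRun ch t
    let r := pvScan (List.drop run (ch :: t))
    (r.1 || (run == 2), r.2 || (run == 3))
termination_by s => s.length
decreasing_by
  simp only [List.length_drop, List.length_cons]
  have := pvRun_le_length ch t
  omega

def count_alt (str_ : String) : Bool × Bool :=
  pvScan (PySem.List.sorted str_.toList (fun c => c))

-- ===== PRECONDITION & SPEC =====
def Spec_count (str_ : String) (out : Bool × Bool) : Prop := out = count_alt str_
instance (str_ : String) (out : Bool × Bool) : Decidable (Spec_count str_ out) := by unfold Spec_count; infer_instance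

-- ===== CLAIM (what is proved, stated in full; the proofs are below) =====
def Claim_equal_count : Prop := ∀ (str_ : String), Dom_count str_ → Spec_count str_ (count str_)

-- ===== LEMMAS AND PROOFS =====

-- the common characterisation: a flag per count value 2 / 3 over the multiset of characters
def pvTarget (l : List Char) : Bool × Bool :=
  (l.any (fun c => l.count c == 2), l.any (fun c => l.count c == 3))

theorem pv_foldl_flags (L : List (Char × Int)) (a b : Bool) :
    L.foldl
      (fun (st : Bool × Bool) (kv : Char × Int) =>
        if kv.2 == 2 then (true, st.2)
        else if kv.2 == 3 then (st.1, true)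
        else st)
      (a, b)
    = (a || L.any (fun kv => kv.2 == 2), b || L.any (fun kv => kv.2 == 3)) := by
  induction L generalizing a b with
  | nil => simp
  | cons hd tl ih =>
    simp only [List.foldl_cons, List.any_cons]
    by_cases h2 : hd.2 = 2
    · rw [if_pos (by simp [h2]), ih]
      simp [h2]
    · by_cases h3 : hd.2 = 3
      · rw [if_neg (by simp [h2]), if_pos (by simp [h3]), ih]
        simp [h3]
      · rw [if_neg (by simp [h2]), if_neg (by simp [h3]), ih]
        have e2 : (hd.2 == 2) = false := by simpa using h2
        have e3 : (hd.2 == 3) = false := by simpa using h3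
        simp [e2, e3]

theorem pv_count_eq_target (str_ : String) : count str_ = pvTarget str_.toList := by
  classical
  unfold count pvTarget
  simp only [PySem.Dict.items_counter, pv_foldl_flags, Bool.false_or, Prod.mk.injEq]
  refine ⟨?_, ?_⟩ <;>
  · rw [Bool.eq_iff_iff]
    simp only [List.any_map, Function.comp_apply, List.any_eq_true, PySem.Set.mem_ofList,
      beq_iff_eq]
    constructor
    · rintro ⟨c, hc, h⟩
      exact ⟨c, hc, by exact_mod_cast h⟩
    · rintro ⟨c, hc, h⟩
      exact ⟨c, hc, by exact_mod_cast h⟩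

theorem pvRun_eq_takeWhile (ch : Char) (t : List Char) :
    pvRun ch t = (t.takeWhile (· == ch)).length := by
  induction t with
  | nil => simp [pvRun]
  | cons c t ih =>
    by_cases h : c = ch <;> simp [pvRun, h, ih]

theorem pvDrop_run (ch : Char) (t : List Char) :
    t.drop (pvRun ch t) = t.dropWhile (· == ch) := by
  induction t with
  | nil => simp [pvRun]
  | cons c t ih =>
    by_cases h : c = ch <;> simp [pvRun, h, ih]

-- pvTarget is invariant under permutation
theorem pvTarget_perm {l l' : List Char} (h : l.Perm l') : pvTarget l = pvTarget l' := by
  unfold pvTarget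
  rw [Prod.mk.injEq]
  constructor <;>
  · rw [Bool.eq_iff_iff]
    simp only [List.any_eq_true]
    constructor
    · rintro ⟨c, hc, hcnt⟩
      exact ⟨c, h.mem_iff.mp hc, by rwa [← h.count_eq]⟩
    · rintro ⟨c, hc, hcnt⟩
      exact ⟨c, h.mem_iff.mpr hc, by rwa [h.count_eq]⟩

-- on a sorted list, the scan computes the target
theorem pvScan_sorted_aux (n : Nat) : ∀ (s : List Char), s.length ≤ n →
    List.Pairwise (· ≤ ·) s → pvScan s = pvTarget s := by
  induction n with
  | zero =>
    intro s hlen _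
    have : s = [] := List.eq_nil_of_length_eq_zero (Nat.le_zero.mp hlen)
    simp [this, pvScan, pvTarget]
  | succ n ih =>
  intro s hlen hs
  match s, hs with
  | [], _ => simp [pvScan, pvTarget]
  | ch :: t, hs =>
    have hle : ∀ x ∈ t, ch ≤ x := fun x hx => List.rel_of_pairwise_cons hs hx
    have ht : List.Pairwise (· ≤ ·) t := hs.of_cons
    set w := t.takeWhile (· == ch) with hw
    set r := t.dropWhile (· == ch) with hr
    have htwr : t = w ++ r := (List.takeWhile_append_dropWhile (p := (· == ch)) (l := t)).symm
    have hwch : ∀ x ∈ w, x = ch := by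
      intro x hx
      have := List.mem_takeWhile_imp hx
      simpa using this
    have hrsub : r.Sublist t := List.dropWhile_sublist _
    have hrsort : List.Pairwise (· ≤ ·) r := ht.sublist hrsub
    have hchr : ch ∉ r := by
      intro hmem
      match hhead : r with
      | [] => simp at hmem
      | d :: r' =>
        have hd : ¬ (d == ch) = true := by
          have := List.head_dropWhile_not (p := (· == ch)) (l := t)
          simp only [← hr] at this
          simpa using this (by simp)
        have hdne : d ≠ ch := by simpa using hd
        have hdt : d ∈ t := hrsub.mem (by simp)
        have hchd : ch < d := lt_of_le_of_ne (hle d hdt) (Ne.symm hdne)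
        have hdleast : ∀ x ∈ r', d ≤ x := fun x hx => List.rel_of_pairwise_cons hrsort hx
        rcases (by simpa [hhead] using hmem : ch = d ∨ ch ∈ r') with h | h
        · exact absurd h.symm hdne
        · exact absurd (hdleast ch h) (not_le.mpr hchd)
    -- counts
    have hcount_ch : (ch :: t).count ch = 1 + w.length := by
      rw [List.count_cons_self, htwr, List.count_append]
      have h1 : w.count ch = w.length := by
        rw [List.count_eq_length]
        intro x hx; exact ((hwch x hx) ▸ rfl)
      have h2 : r.count ch = 0 := List.count_eq_zero.mpr hchr
      omega
    have hcount_r : ∀ c ∈ r, (ch :: t).count c = r.count c := by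
      intro c hc
      have hne : c ≠ ch := fun h => hchr (h ▸ hc)
      have hne' : ch ≠ c := Ne.symm hne
      have hw0 : w.count c = 0 := List.count_eq_zero.mpr (fun hcw => hne (hwch c hcw))
      rw [htwr]
      simp [List.count_append, hne', hw0]
    -- unfold one step of the scan
    have hrun : pvRun ch t = w.length := by rw [pvRun_eq_takeWhile]
    have hdrop : List.drop (1 + w.length) (ch :: t) = r := by
      rw [← hrun, show (1 + pvRun ch t) = pvRun ch t + 1 by omega]
      simp only [List.drop_succ_cons]
      exact pvDrop_run ch t
    have hstep : pvScan (ch :: t) =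
        ((pvScan r).1 || ((1 + w.length) == 2), (pvScan r).2 || ((1 + w.length) == 3)) := by
      rw [pvScan]
      simp only [hrun, hdrop]
    have hrlen : r.length < (ch :: t).length := by
      have := hrsub.length_le
      simp only [List.length_cons]; omega
    have hihr : pvScan r = pvTarget r := by
      refine ih r ?_ hrsort
      have hrt := hrsub.length_le
      simp only [List.length_cons] at hlen
      omega
    rw [hstep, hihr]
    -- compare with the target on ch :: t, component by component
    unfold pvTarget
    have hany : ∀ (n : Nat),
        ((ch :: t).any fun c => (ch :: t).count c == n)
          = ((r.any fun c => r.count c == n) || ((1 + w.length) == n)) := by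
      intro n
      rw [Bool.eq_iff_iff]
      simp only [List.any_eq_true, Bool.or_eq_true, beq_iff_eq]
      constructor
      · rintro ⟨c, hc, hcnt⟩
        by_cases hcch : c = ch
        · right
          rw [hcch] at hcnt
          omega
        · left
          have hct : c ∈ t := by
            rcases List.mem_cons.mp hc with h | h
            · exact absurd h hcch
            · exact h
          have hcr : c ∈ r := by
            rw [htwr] at hct
            rcases List.mem_append.mp hct with h | h
            · exact absurd (hwch c h) hcch
            · exact h
          exact ⟨c, hcr, by rw [← hcount_r c hcr]; exact hcnt⟩
      · rintro (⟨c, hc, hcnt⟩ | hn)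
        · exact ⟨c, List.mem_cons_of_mem _ ((htwr ▸ List.mem_append.mpr (Or.inr hc))),
            by rw [hcount_r c hc]; exact hcnt⟩
        · exact ⟨ch, List.mem_cons_self, by omega⟩
    rw [hany 2, hany 3]

theorem pv_alt_eq_target (str_ : String) : count_alt str_ = pvTarget str_.toList := by
  unfold count_alt
  rw [pvScan_sorted_aux (PySem.List.sorted str_.toList (fun c => c)).length _ le_rfl
        (PySem.List.sorted_pairwise str_.toList (fun c => c)),
      pvTarget_perm (PySem.List.sorted_perm str_.toList (fun c => c) false)]

-- ===== VERDICT (by name: the statement is the Claim_ definition above) =====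
theorem count_spec : Claim_equal_count := by
  intro str_ _
  unfold Spec_count
  rw [pv_count_eq_target, pv_alt_eq_target]
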